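-- pv_equiv track=rewrite | github.com/SaturnFromTitan/advent_of_code | 2023/day16/part1.py | get_new_positions
-- ===== SOURCE A (Python) =====
-- import enum
--
-- class Direction(enum.StrEnum):
--     LEFT = "LEFT"
--     RIGHT = "RIGHT"
--     UP = "UP"
--     DOWN = "DOWN"
--
-- RayPosition = tuple[int, int, Direction]
--
-- def get_new_positions(
--     symbol: str, position: RayPosition, max_row: int, max_col: int
-- ) -> set[RayPosition]:
--     row, col, direction = position
--     match (direction, symbol):
--         # RIGHT
--         case (Direction.RIGHT, "."):
--             offsets = {(0, 1, Direction.RIGHT)}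
--         case (Direction.RIGHT, "-"):
--             offsets = {(0, 1, Direction.RIGHT)}
--         case (Direction.RIGHT, "|"):
--             offsets = {(-1, 0, Direction.UP), (1, 0, Direction.DOWN)}
--         case (Direction.RIGHT, "/"):
--             offsets = {(-1, 0, Direction.UP)}
--         case (Direction.RIGHT, "\\"):
--             offsets = {(1, 0, Direction.DOWN)}
--         # LEFT
--         case (Direction.LEFT, "."):
--             offsets = {(0, -1, Direction.LEFT)}
--         case (Direction.LEFT, "-"):
--             offsets = {(0, -1, Direction.LEFT)}
--         case (Direction.LEFT, "|"):
--             offsets = {(-1, 0, Direction.UP), (1, 0, Direction.DOWN)}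
--         case (Direction.LEFT, "/"):
--             offsets = {(1, 0, Direction.DOWN)}
--         case (Direction.LEFT, "\\"):
--             offsets = {(-1, 0, Direction.UP)}
--         # UP
--         case (Direction.UP, "."):
--             offsets = {(-1, 0, Direction.UP)}
--         case (Direction.UP, "-"):
--             offsets = {(0, -1, Direction.LEFT), (0, 1, Direction.RIGHT)}
--         case (Direction.UP, "|"):
--             offsets = {(-1, 0, Direction.UP)}
--         case (Direction.UP, "/"):
--             offsets = {(0, 1, Direction.RIGHT)}
--         case (Direction.UP, "\\"):
--             offsets = {(0, -1, Direction.LEFT)}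
--         # DOWN
--         case (Direction.DOWN, "."):
--             offsets = {(1, 0, Direction.DOWN)}
--         case (Direction.DOWN, "-"):
--             offsets = {(0, -1, Direction.LEFT), (0, 1, Direction.RIGHT)}
--         case (Direction.DOWN, "|"):
--             offsets = {(1, 0, Direction.DOWN)}
--         case (Direction.DOWN, "/"):
--             offsets = {(0, -1, Direction.LEFT)}
--         case (Direction.DOWN, "\\"):
--             offsets = {(0, 1, Direction.RIGHT)}
--         case _:
--             raise ValueError("Can't map this direction & symbol")
--
--     return {
--         (row + row_offset, col + col_offset, new_direction)
--         for (row_offset, col_offset, new_direction) in offsets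
--         if 0 <= row + row_offset <= max_row and 0 <= col + col_offset <= max_col
--     }
-- ===== SOURCE B (Python) =====
-- def get_new_positions(symbol, position, max_row, max_col):
--     row, col, direction = position
--     vecs = {"RIGHT": (0, 1), "LEFT": (0, -1), "UP": (-1, 0), "DOWN": (1, 0)}
--     names = {v: k for k, v in vecs.items()}
--     if direction not in vecs:
--         raise ValueError("Can't map this direction & symbol")
--     dr, dc = vecs[direction]
--     if symbol == ".":
--         outs = [(dr, dc)]
--     elif symbol == "/":
--         outs = [(-dc, -dr)]
--     elif symbol == "\\":
--         outs = [(dc, dr)]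
--     elif symbol == "|":
--         outs = [(-1, 0), (1, 0)] if dc != 0 else [(dr, dc)]
--     elif symbol == "-":
--         outs = [(0, -1), (0, 1)] if dr != 0 else [(dr, dc)]
--     else:
--         raise ValueError("Can't map this direction & symbol")
--     return {
--         (row + a, col + b, names[(a, b)])
--         for (a, b) in outs
--         if 0 <= row + a <= max_row and 0 <= col + b <= max_col
--     }
-- ===== Notes on version B (the rewrite author's own statement) =====
-- stated objective: idiomatic
-- what changed: Replaces the 20-case (direction, symbol) match with direction-as-unit-vector arithmetic: '/' maps (dr,dc) to (-dc,-dr), '\' to (dc,dr), splitters test dr/dc in closed form, and the result direction is read back from the vector.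
import Mathlib
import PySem

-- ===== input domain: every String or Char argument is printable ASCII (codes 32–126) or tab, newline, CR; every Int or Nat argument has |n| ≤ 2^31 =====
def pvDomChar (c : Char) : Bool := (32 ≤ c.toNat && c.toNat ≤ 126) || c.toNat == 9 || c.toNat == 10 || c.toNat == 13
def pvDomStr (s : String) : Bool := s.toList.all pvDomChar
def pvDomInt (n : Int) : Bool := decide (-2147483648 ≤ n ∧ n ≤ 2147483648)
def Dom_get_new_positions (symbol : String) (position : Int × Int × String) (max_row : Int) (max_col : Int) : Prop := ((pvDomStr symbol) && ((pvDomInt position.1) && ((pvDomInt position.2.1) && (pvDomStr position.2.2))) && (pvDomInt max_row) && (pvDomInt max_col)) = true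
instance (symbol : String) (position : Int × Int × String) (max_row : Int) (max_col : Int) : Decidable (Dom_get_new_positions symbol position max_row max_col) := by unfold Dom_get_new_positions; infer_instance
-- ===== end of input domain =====

-- B replaces A's 20-case (direction, symbol) match by direction-as-unit-vector arithmetic (idiomatic; same cost).

-- ===== PORT A =====
-- Python builds a set; elements are pairwise distinct here, ported as the list in literal order,
-- with the final set comprehension as filter + map.
def get_new_positions (symbol : String) (position : Int × Int × String) (max_row : Int) (max_col : Int) : List (Int × Int × String) :=
  let row := position.1
  let col := position.2.1
  let direction := position.2.2
  let offsets : List (Int × Int × String) :=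
    match direction, symbol with
    | "RIGHT", "." => [(0, 1, "RIGHT")]
    | "RIGHT", "-" => [(0, 1, "RIGHT")]
    | "RIGHT", "|" => [(-1, 0, "UP"), (1, 0, "DOWN")]
    | "RIGHT", "/" => [(-1, 0, "UP")]
    | "RIGHT", "\\" => [(1, 0, "DOWN")]
    | "LEFT", "." => [(0, -1, "LEFT")]
    | "LEFT", "-" => [(0, -1, "LEFT")]
    | "LEFT", "|" => [(-1, 0, "UP"), (1, 0, "DOWN")]
    | "LEFT", "/" => [(1, 0, "DOWN")]
    | "LEFT", "\\" => [(-1, 0, "UP")]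
    | "UP", "." => [(-1, 0, "UP")]
    | "UP", "-" => [(0, -1, "LEFT"), (0, 1, "RIGHT")]
    | "UP", "|" => [(-1, 0, "UP")]
    | "UP", "/" => [(0, 1, "RIGHT")]
    | "UP", "\\" => [(0, -1, "LEFT")]
    | "DOWN", "." => [(1, 0, "DOWN")]
    | "DOWN", "-" => [(0, -1, "LEFT"), (0, 1, "RIGHT")]
    | "DOWN", "|" => [(1, 0, "DOWN")]
    | "DOWN", "/" => [(0, -1, "LEFT")]
    | "DOWN", "\\" => [(0, 1, "RIGHT")]
    | _, _ => []   -- Python raises ValueError here; excluded by Pre_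
  (offsets.filter (fun o =>
      decide (0 ≤ row + o.1) && decide (row + o.1 ≤ max_row) &&
      decide (0 ≤ col + o.2.1) && decide (col + o.2.1 ≤ max_col))).map
    (fun o => (row + o.1, col + o.2.1, o.2.2))

-- ===== PORT B =====
def pvDirVec? (d : String) : Option (Int × Int) :=
  match d with
  | "RIGHT" => some (0, 1)
  | "LEFT" => some (0, -1)
  | "UP" => some (-1, 0)
  | "DOWN" => some (1, 0)
  | _ => none

def pvVecName (v : Int × Int) : String :=
  match v with
  | (0, 1) => "RIGHT"
  | (0, -1) => "LEFT"
  | (-1, 0) => "UP"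
  | _ => "DOWN"

def get_new_positions_alt (symbol : String) (position : Int × Int × String) (max_row : Int) (max_col : Int) : List (Int × Int × String) :=
  let row := position.1
  let col := position.2.1
  let direction := position.2.2
  match pvDirVec? direction with
  | none => []   -- Python raises ValueError here; excluded by Pre_
  | some (dr, dc) =>
    let outs : List (Int × Int) :=
      if symbol = "." then [(dr, dc)]
      else if symbol = "/" then [(-dc, -dr)]
      else if symbol = "\\" then [(dc, dr)]
      else if symbol = "|" then (if dc ≠ 0 then [(-1, 0), (1, 0)] else [(dr, dc)])
      else if symbol = "-" then (if dr ≠ 0 then [(0, -1), (0, 1)] else [(dr, dc)])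
      else []    -- Python raises ValueError here; excluded by Pre_
    (outs.filter (fun v =>
        decide (0 ≤ row + v.1) && decide (row + v.1 ≤ max_row) &&
        decide (0 ≤ col + v.2) && decide (col + v.2 ≤ max_col))).map
      (fun v => (row + v.1, col + v.2, pvVecName v))

-- ===== PRECONDITION & SPEC =====
-- Pre_ excludes exactly the inputs where Python A raises ValueError (unknown direction or symbol).
def Pre_get_new_positions (symbol : String) (position : Int × Int × String) (max_row : Int) (max_col : Int) : Prop :=
  (position.2.2 = "LEFT" ∨ position.2.2 = "RIGHT" ∨ position.2.2 = "UP" ∨ position.2.2 = "DOWN") ∧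
  (symbol = "." ∨ symbol = "-" ∨ symbol = "|" ∨ symbol = "/" ∨ symbol = "\\")
instance (symbol : String) (position : Int × Int × String) (max_row : Int) (max_col : Int) : Decidable (Pre_get_new_positions symbol position max_row max_col) := by unfold Pre_get_new_positions; infer_instance

def pvWitness_get_new_positions : String × (Int × Int × String) × Int × Int := ("|", (2, 3, "RIGHT"), 5, 5)

def Spec_get_new_positions (symbol : String) (position : Int × Int × String) (max_row : Int) (max_col : Int) (out : List (Int × Int × String)) : Prop := out = get_new_positions_alt symbol position max_row max_col
instance (symbol : String) (position : Int × Int × String) (max_row : Int) (max_col : Int) (out : List (Int × Int × String)) : Decidable (Spec_get_new_positions symbol position max_row max_col out) := by unfold Spec_get_new_positions; infer_instance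

-- ===== CLAIM (what is proved, stated in full; the proofs are below) =====
def Claim_equal_get_new_positions : Prop := ∀ (symbol : String) (position : Int × Int × String) (max_row : Int) (max_col : Int), Dom_get_new_positions symbol position max_row max_col → Pre_get_new_positions symbol position max_row max_col → Spec_get_new_positions symbol position max_row max_col (get_new_positions symbol position max_row max_col)

-- ===== LEMMAS AND PROOFS =====

-- ===== VERDICT (by name: the statement is the Claim_ definition above) =====
-- filter∘map commute: A filters named triples, B filters bare vectors and names them afterwards
theorem pv_bridge (row col mr mc : Int) (vs : List (Int × Int)) :
    List.map (fun (o : Int × Int × String) => (row + o.1, col + o.2.1, o.2.2))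
      (List.filter (fun o =>
          decide (0 ≤ row + o.1) && decide (row + o.1 ≤ mr) &&
          decide (0 ≤ col + o.2.1) && decide (col + o.2.1 ≤ mc))
        (vs.map (fun v => (v.1, v.2, pvVecName v))))
    = List.map (fun (v : Int × Int) => (row + v.1, col + v.2, pvVecName v))
        (List.filter (fun v =>
            decide (0 ≤ row + v.1) && decide (row + v.1 ≤ mr) &&
            decide (0 ≤ col + v.2) && decide (col + v.2 ≤ mc)) vs) := by
  rw [List.filter_map, List.map_map]; rfl

set_option maxHeartbeats 1000000 in
theorem get_new_positions_spec : Claim_equal_get_new_positions := by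
  intro symbol ⟨row, col, direction⟩ max_row max_col hdom ⟨hd, hs⟩
  clear hdom
  unfold Spec_get_new_positions
  rcases hd with hd | hd | hd | hd <;> rcases hs with hs | hs | hs | hs | hs <;>
    subst hd <;> subst hs <;>
    simp only [get_new_positions, get_new_positions_alt, pvDirVec?, reduceIte,
      neg_neg, neg_zero] <;>
    rw [← pv_bridge] <;> rfl
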